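-- pv_equiv track=rewrite | github.com/ForeverHaibara/Triple-SOS | triples/core/structsos/univariate.py | mat_to_sympy_poly
-- ===== SOURCE A (Python) =====
-- from typing import Tuple, List, Optional, Union
--
-- def mat_to_sympy_poly(M2: List[List]) -> List:
--     """
--     * Need not to be implemented for subclass.
--     """
--     n = len(M2)
--     ss = [0] * (2*n - 1)
--     for i in range(2*n - 1):
--         m = i // 2
--         if i % 2 == 0:
--             l = min(m, n - m - 1)
--             s = sum(M2[m - j][m + j] for j in range(1, l + 1)) * 2 + M2[m][m]
--         else:
--             l = min(m, n - m - 2)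
--             s = sum(M2[m - j][m + j + 1] for j in range(l + 1)) * 2
--         ss[i] = s
--     return ss
-- ===== SOURCE B (Python) =====
-- def mat_to_sympy_poly(M2):
--     n = len(M2)
--     if n == 0:
--         return []
--     off = [0] * (2*n - 1)
--     diag = [0] * (2*n - 1)
--     for i in range(n):
--         row = M2[i]
--         diag[2*i] = row[i]
--         for j in range(i + 1, n):
--             off[i + j] += row[j]
--     return [2*off[k] + diag[k] for k in range(2*n - 1)]
-- ===== Notes on version B (the rewrite author's own statement) =====
-- stated objective: alternative
-- what changed: Replaces A's per-anti-diagonal inward gather (with even/odd branch and center-offset indexing) by a single scatter pass over the upper triangle into off-diagonal and diagonal bucket arrays, combined as 2*off[k]+diag[k] at the end.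
import Mathlib
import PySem

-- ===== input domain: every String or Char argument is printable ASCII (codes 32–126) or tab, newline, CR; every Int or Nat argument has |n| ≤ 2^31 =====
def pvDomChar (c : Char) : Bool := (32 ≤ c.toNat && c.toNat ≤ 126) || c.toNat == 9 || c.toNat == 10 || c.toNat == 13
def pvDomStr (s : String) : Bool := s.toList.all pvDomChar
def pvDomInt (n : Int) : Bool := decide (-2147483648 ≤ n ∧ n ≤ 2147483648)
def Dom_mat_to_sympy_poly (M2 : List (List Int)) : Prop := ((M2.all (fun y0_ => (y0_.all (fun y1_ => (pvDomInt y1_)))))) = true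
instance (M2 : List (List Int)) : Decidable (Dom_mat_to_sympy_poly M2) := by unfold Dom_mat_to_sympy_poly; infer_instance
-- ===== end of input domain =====

-- B replaces A's per-anti-diagonal gather by one scatter pass over the upper triangle (alternative decomposition, same cost).

-- ===== PORT A =====
-- Transliteration of A. All indices A computes are nonnegative and (inside Pre_) in range,
-- so Nat indexing with `getD` is exact there; `range(1, l+1)` is `List.range' 1 l`,
-- `range(l+1)` is `List.range (l+1)`; `sum(...)` is a left fold from 0.
def mat_to_sympy_poly (M2 : List (List Int)) : List Int :=
  let n := M2.length
  (List.range (2*n - 1)).map (fun i =>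
    let m := i / 2
    if i % 2 = 0 then
      ((List.range' 1 (min m (n - m - 1))).foldl
        (fun acc j => acc + ((M2.getD (m - j) []).getD (m + j) 0)) 0) * 2
        + ((M2.getD m []).getD m 0)
    else
      ((List.range (min m (n - m - 2) + 1)).foldl
        (fun acc j => acc + ((M2.getD (m - j) []).getD (m + j + 1) 0)) 0) * 2)

-- ===== PORT B =====
-- Body of B's outer loop: set diag[2*i] = row[i] and scatter row[j] (j in range(i+1, n))
-- into off[i+j]; state is the pair (off, diag).
def altStep (M2 : List (List Int)) (n : Nat) (st : List Int × List Int) (i : Nat) :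
    List Int × List Int :=
  let row := M2.getD i []
  let diag' := st.2.set (2*i) (row.getD i 0)
  let off' := (List.range' (i+1) (n - (i+1))).foldl
      (fun o j => o.set (i+j) (o.getD (i+j) 0 + row.getD j 0)) st.1
  (off', diag')

-- Transliteration of B (Source B): scatter pass then the final comprehension.
def mat_to_sympy_poly_alt (M2 : List (List Int)) : List Int :=
  let n := M2.length
  if n = 0 then []
  else
    let st := (List.range n).foldl (altStep M2 n)
      (List.replicate (2*n - 1) 0, List.replicate (2*n - 1) 0)
    (List.range (2*n - 1)).map (fun k => 2 * st.1.getD k 0 + st.2.getD k 0)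

-- ===== PRECONDITION & SPEC =====
-- Pre_ excludes exactly the inputs on which the Python A raises IndexError: A reads every
-- upper-triangle cell (r, c), r ≤ c < len(M2), so it returns iff every row has length ≥ len(M2).
def Pre_mat_to_sympy_poly (M2 : List (List Int)) : Prop :=
  ∀ row ∈ M2, M2.length ≤ row.length
instance (M2 : List (List Int)) : Decidable (Pre_mat_to_sympy_poly M2) := by
  unfold Pre_mat_to_sympy_poly; infer_instance
def pvWitness_mat_to_sympy_poly : List (List Int) := [[1, 2], [2, 3]]

def Spec_mat_to_sympy_poly (M2 : List (List Int)) (out : List Int) : Prop := out = mat_to_sympy_poly_alt M2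
instance (M2 : List (List Int)) (out : List Int) : Decidable (Spec_mat_to_sympy_poly M2 out) := by unfold Spec_mat_to_sympy_poly; infer_instance

-- ===== CLAIM (what is proved, stated in full; the proofs are below) =====
def Claim_equal_mat_to_sympy_poly : Prop := ∀ (M2 : List (List Int)), Dom_mat_to_sympy_poly M2 → Pre_mat_to_sympy_poly M2 → Spec_mat_to_sympy_poly M2 (mat_to_sympy_poly M2)

-- ===== LEMMAS AND PROOFS =====

-- The single-cell contribution of row i to anti-diagonal k (strict upper triangle only).
def pvQ (M2 : List (List Int)) (i k : Nat) : Int :=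
  if 2*i < k ∧ k - i < M2.length then (M2.getD i []).getD (k - i) 0 else 0

-- Partial off-diagonal bucket value after scattering rows 0..t-1.
def pvP (M2 : List (List Int)) (t k : Nat) : Int :=
  ((List.range t).map (fun i => pvQ M2 i k)).sum

-- Diagonal bucket value after scattering rows 0..t-1.
def pvDg (M2 : List (List Int)) (t k : Nat) : Int :=
  if k % 2 = 0 ∧ k / 2 < t then (M2.getD (k/2) []).getD (k/2) 0 else 0

lemma pv_foldl_add (f : Nat → Int) :
    ∀ (l : List Nat) (a : Int), l.foldl (fun acc j => acc + f j) a = a + (l.map f).sum := by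
  intro l
  induction l with
  | nil => intro a; simp
  | cons x xs ih => intro a; simp [List.foldl_cons, ih]; ring

lemma pv_getD_set (o : List Int) (a : Nat) (x : Int) (k : Nat) :
    (o.set a x).getD k 0 = if a = k ∧ a < o.length then x else o.getD k 0 := by
  simp only [List.getD, List.getElem?_set]
  split_ifs with h h1 h2 h3 <;> simp_all
  omega

lemma pv_inner_fold (v : Nat → Int) (i : Nat) :
    ∀ (len s : Nat) (o : List Int),
      (∀ j, s ≤ j → j < s + len → i + j < o.length) →
      (((List.range' s len).foldl (fun o j => o.set (i+j) (o.getD (i+j) 0 + v j)) o).length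
          = o.length ∧
       ∀ k, ((List.range' s len).foldl (fun o j => o.set (i+j) (o.getD (i+j) 0 + v j)) o).getD k 0
          = o.getD k 0 + ((List.range' s len).map (fun j => if i + j = k then v j else 0)).sum) := by
  intro len
  induction len with
  | zero => intro s o _; simp
  | succ len ih =>
    intro s o h
    rw [List.range'_succ]
    have hlt : i + s < o.length := h s (le_refl s) (by omega)
    set o' : List Int := o.set (i+s) (o.getD (i+s) 0 + v s) with ho'
    have hlen' : o'.length = o.length := by simp [ho']
    have h' : ∀ j, s+1 ≤ j → j < (s+1) + len → i + j < o'.length := by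
      intro j hj1 hj2; rw [hlen']; exact h j (by omega) (by omega)
    obtain ⟨hL, hG⟩ := ih (s+1) o' h'
    constructor
    · rw [List.foldl_cons, ← ho', hL, hlen']
    · intro k
      rw [List.foldl_cons, ← ho', hG k]
      simp only [List.map_cons, List.sum_cons]
      have : o'.getD k 0 = o.getD k 0 + (if i + s = k then v s else 0) := by
        rw [ho', pv_getD_set]
        by_cases hc : i + s = k
        · subst hc
          rw [if_pos ⟨rfl, hlt⟩, if_pos rfl]
        · rw [if_neg (fun hh => hc hh.1), if_neg hc]
          simp
      rw [this]; ring

lemma pv_sum_ite_hit (v : Nat → Int) (i k : Nat) :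
    ∀ (len s : Nat),
      ((List.range' s len).map (fun j => if i + j = k then v j else 0)).sum
        = if s + i ≤ k ∧ k < s + len + i then v (k - i) else 0 := by
  intro len
  induction len with
  | zero =>
    intro s
    have : ¬ (s + i ≤ k ∧ k < s + 0 + i) := by omega
    simp
  | succ len ih =>
    intro s
    rw [List.range'_succ]
    simp only [List.map_cons, List.sum_cons, ih (s+1)]
    by_cases h : i + s = k
    · have hk : k - i = s := by omega
      split_ifs with h1 h2 <;> simp_all <;> omega
    · split_ifs with h1 h2 h3 <;> simp_all <;> omega

lemma pv_inner_sum_eq_Q (M2 : List (List Int)) (t k : Nat) (ht : t < M2.length) :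
    ((List.range' (t+1) (M2.length - (t+1))).map
      (fun j => if t + j = k then (M2.getD t []).getD j 0 else 0)).sum = pvQ M2 t k := by
  rw [pv_sum_ite_hit (fun j => (M2.getD t []).getD j 0) t k]
  unfold pvQ
  split_ifs with h1 h2 h3 <;> first | rfl | omega

lemma pv_outer_spec (M2 : List (List Int)) :
    ∀ (t : Nat), t ≤ M2.length →
      (((List.range t).foldl (altStep M2 M2.length)
          (List.replicate (2*M2.length - 1) 0, List.replicate (2*M2.length - 1) 0)).1.length
        = 2*M2.length - 1) ∧
      (((List.range t).foldl (altStep M2 M2.length)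
          (List.replicate (2*M2.length - 1) 0, List.replicate (2*M2.length - 1) 0)).2.length
        = 2*M2.length - 1) ∧
      (∀ k, ((List.range t).foldl (altStep M2 M2.length)
          (List.replicate (2*M2.length - 1) 0, List.replicate (2*M2.length - 1) 0)).1.getD k 0
        = pvP M2 t k ∧
        ((List.range t).foldl (altStep M2 M2.length)
          (List.replicate (2*M2.length - 1) 0, List.replicate (2*M2.length - 1) 0)).2.getD k 0
        = pvDg M2 t k) := by
  intro t
  induction t with
  | zero =>
    intro _
    refine ⟨by simp, by simp, ?_⟩
    intro k
    simp [pvP, pvDg]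
  | succ t ih =>
    intro ht
    have ht' : t < M2.length := by omega
    obtain ⟨h1, h2, h3⟩ := ih (by omega)
    rw [List.range_succ, List.foldl_append, List.foldl_cons, List.foldl_nil]
    set st := (List.range t).foldl (altStep M2 M2.length)
        (List.replicate (2*M2.length - 1) 0, List.replicate (2*M2.length - 1) 0) with hst
    have hbound : ∀ j, t+1 ≤ j → j < (t+1) + (M2.length - (t+1)) → t + j < st.1.length := by
      intro j hj1 hj2; rw [h1]; omega
    obtain ⟨hIL, hIG⟩ := pv_inner_fold (fun j => (M2.getD t []).getD j 0) t
        (M2.length - (t+1)) (t+1) st.1 hbound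
    refine ⟨?_, ?_, ?_⟩
    · show (altStep M2 M2.length st t).1.length = 2*M2.length - 1
      simp only [altStep]; rw [hIL, h1]
    · show (altStep M2 M2.length st t).2.length = 2*M2.length - 1
      simp only [altStep, List.length_set]; exact h2
    · intro k
      constructor
      · show (altStep M2 M2.length st t).1.getD k 0 = pvP M2 (t+1) k
        simp only [altStep]
        rw [hIG k, (h3 k).1, pv_inner_sum_eq_Q M2 t k ht']
        unfold pvP
        rw [List.range_succ, List.map_append, List.sum_append]
        simp
      · show (altStep M2 M2.length st t).2.getD k 0 = pvDg M2 (t+1) k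
        simp only [altStep]
        rw [pv_getD_set, h2]
        unfold pvDg
        rw [(h3 k).2]
        unfold pvDg
        split_ifs with a1 a2 a3 a4 a5 <;>
          first
          | rfl
          | omega
          | (obtain ⟨e1, e2⟩ := a1; have : k / 2 = t := by omega
             simp_all)

lemma pv_sum_window (g : Nat → Int) :
    ∀ (n a b : Nat), a ≤ b → b ≤ n →
      ((List.range n).map (fun i => if a ≤ i ∧ i < b then g i else 0)).sum
        = ((List.range' a (b - a)).map g).sum := by
  intro n
  induction n with
  | zero =>
    intro a b hab hbn
    have : b = 0 := by omega
    have : a = 0 := by omega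
    simp_all
  | succ n ih =>
    intro a b hab hbn
    rw [List.range_succ, List.map_append, List.sum_append]
    simp only [List.map_cons, List.map_nil, List.sum_cons, List.sum_nil, add_zero]
    by_cases hb : b ≤ n
    · rw [ih a b hab hb]
      have : (if a ≤ n ∧ n < b then g n else 0) = 0 := by
        split_ifs with h
        · omega
        · rfl
      simp [this]
    · have hbeq : b = n + 1 := by omega
      by_cases ha : a ≤ n
      · have hcongr : ((List.range n).map (fun i => if a ≤ i ∧ i < b then g i else 0))
            = ((List.range n).map (fun i => if a ≤ i ∧ i < n then g i else 0)) := by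
          apply List.map_congr_left
          intro i hi
          rw [List.mem_range] at hi
          split_ifs <;> first | rfl | omega
        rw [hcongr, ih a n ha (le_refl n)]
        have hlast : (if a ≤ n ∧ n < b then g n else 0) = g n := by
          split_ifs with h <;> first | rfl | omega
        rw [hlast]
        have hrng : List.range' a (b - a) = List.range' a (n - a) ++ [n] := by
          have h1 : b - a = (n - a) + 1 := by omega
          rw [h1, List.range'_concat]
          congr 1
          simp
          omega
        rw [hrng, List.map_append, List.sum_append]
        simp
      · have ha' : a = n + 1 := by omega
        have hz : ((List.range n).map (fun i => if a ≤ i ∧ i < b then g i else 0))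
            = ((List.range n).map (fun _ => (0:Int))) := by
          apply List.map_congr_left
          intro i hi
          rw [List.mem_range] at hi
          split_ifs with h <;> first | rfl | omega
        have hlast : (if a ≤ n ∧ n < b then g n else 0) = 0 := by
          split_ifs with h <;> first | rfl | omega
        have hba : b - a = 0 := by omega
        rw [hz, hlast, hba]
        simp

lemma pv_sum_rev (g : Nat → Int) (m : Nat) :
    ∀ (len s : Nat), s + len ≤ m + 1 →
      ((List.range' s len).map (fun j => g (m - j))).sum
        = ((List.range' (m + 1 - (s + len)) len).map g).sum := by
  intro len
  induction len with
  | zero => intro s _; simp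
  | succ len ih =>
    intro s h
    rw [List.range'_succ]
    simp only [List.map_cons, List.sum_cons]
    rw [ih (s+1) (by omega)]
    have ha : m + 1 - (s + (len + 1)) = m - s - len := by omega
    have ha' : m + 1 - (s + 1 + len) = m - s - len := by omega
    rw [ha, ha']
    have hconcat : List.range' (m - s - len) (len + 1)
        = List.range' (m - s - len) len ++ [m - s] := by
      rw [List.range'_concat]
      simp only [one_mul]
      congr 2
      omega
    rw [hconcat, List.map_append, List.sum_append]
    simp
    ring

lemma pv_A_even (M2 : List (List Int)) (m : Nat) (hm : m < M2.length) :
    ((List.range' 1 (min m (M2.length - m - 1))).foldl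
        (fun acc j => acc + ((M2.getD (m - j) []).getD (m + j) 0)) 0) * 2
      + ((M2.getD m []).getD m 0)
    = 2 * pvP M2 M2.length (2*m) + pvDg M2 M2.length (2*m) := by
  set n := M2.length with hn
  set l := min m (n - m - 1) with hl
  set g : Nat → Int := fun i => (M2.getD i []).getD (2*m - i) 0 with hg
  have hdg : pvDg M2 n (2*m) = (M2.getD m []).getD m 0 := by
    unfold pvDg
    have h1 : 2*m % 2 = 0 := by omega
    have h2 : 2*m / 2 = m := by omega
    rw [h2]
    split_ifs with h <;> first | rfl | omega
  have hP : pvP M2 n (2*m) = ((List.range' (m - l) l).map g).sum := by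
    unfold pvP
    have hcongr : ((List.range n).map (fun i => pvQ M2 i (2*m)))
        = ((List.range n).map (fun i => if m - l ≤ i ∧ i < m then g i else 0)) := by
      apply List.map_congr_left
      intro i hi
      rw [List.mem_range] at hi
      unfold pvQ
      rw [← hn]
      have : (2*i < 2*m ∧ 2*m - i < n) ↔ (m - l ≤ i ∧ i < m) := by omega
      split_ifs with h1 h2 h3 <;> first | rfl | omega
    rw [hcongr, pv_sum_window g n (m - l) m (by omega) (by omega)]
    have : m - (m - l) = l := by omega
    rw [this]
  have hsum : ((List.range' 1 l).map (fun j => (M2.getD (m - j) []).getD (m + j) 0)).sum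
      = ((List.range' (m - l) l).map g).sum := by
    have hcongr : ((List.range' 1 l).map (fun j => (M2.getD (m - j) []).getD (m + j) 0))
        = ((List.range' 1 l).map (fun j => g (m - j))) := by
      apply List.map_congr_left
      intro j hj
      rw [List.mem_range'_1] at hj
      have : 2*m - (m - j) = m + j := by omega
      rw [hg]
      simp only []
      rw [this]
    rw [hcongr, pv_sum_rev g m l 1 (by omega)]
    have : m + 1 - (1 + l) = m - l := by omega
    rw [this]
  rw [pv_foldl_add, hdg, hP, ← hsum]
  simp
  ring

lemma pv_A_odd (M2 : List (List Int)) (m : Nat) (hm : m + 1 < M2.length) :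
    ((List.range (min m (M2.length - m - 2) + 1)).foldl
        (fun acc j => acc + ((M2.getD (m - j) []).getD (m + j + 1) 0)) 0) * 2
    = 2 * pvP M2 M2.length (2*m+1) + pvDg M2 M2.length (2*m+1) := by
  set n := M2.length with hn
  set l := min m (n - m - 2) with hl
  set g : Nat → Int := fun i => (M2.getD i []).getD (2*m + 1 - i) 0 with hg
  have hdg : pvDg M2 n (2*m+1) = 0 := by
    unfold pvDg
    split_ifs with h
    · exfalso; omega
    · rfl
  have hP : pvP M2 n (2*m+1) = ((List.range' (m - l) (l + 1)).map g).sum := by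
    unfold pvP
    have hcongr : ((List.range n).map (fun i => pvQ M2 i (2*m+1)))
        = ((List.range n).map (fun i => if m - l ≤ i ∧ i < m + 1 then g i else 0)) := by
      apply List.map_congr_left
      intro i hi
      rw [List.mem_range] at hi
      unfold pvQ
      rw [← hn]
      split_ifs with h1 h2 h3 <;> first | rfl | omega
    rw [hcongr, pv_sum_window g n (m - l) (m + 1) (by omega) (by omega)]
    have : m + 1 - (m - l) = l + 1 := by omega
    rw [this]
  have hsum : ((List.range (l + 1)).map (fun j => (M2.getD (m - j) []).getD (m + j + 1) 0)).sum
      = ((List.range' (m - l) (l + 1)).map g).sum := by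
    rw [List.range_eq_range']
    have hcongr : ((List.range' 0 (l + 1)).map (fun j => (M2.getD (m - j) []).getD (m + j + 1) 0))
        = ((List.range' 0 (l + 1)).map (fun j => g (m - j))) := by
      apply List.map_congr_left
      intro j hj
      rw [List.mem_range'_1] at hj
      have : 2*m + 1 - (m - j) = m + j + 1 := by omega
      rw [hg]
      simp only []
      rw [this]
    rw [hcongr, pv_sum_rev g m (l + 1) 0 (by omega)]
    have : m + 1 - (0 + (l + 1)) = m - l := by omega
    rw [this]
  rw [pv_foldl_add, hdg, hP, ← hsum]
  simp
  ring

-- ===== VERDICT (by name: the statement is the Claim_ definition above) =====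
theorem mat_to_sympy_poly_spec : Claim_equal_mat_to_sympy_poly := by
  intro M2 _ _
  unfold Spec_mat_to_sympy_poly mat_to_sympy_poly mat_to_sympy_poly_alt
  by_cases hn : M2.length = 0
  · simp [hn]
  · simp only [if_neg hn]
    obtain ⟨h1, h2, h3⟩ := pv_outer_spec M2 M2.length (le_refl _)
    apply List.map_congr_left
    intro i hi
    rw [List.mem_range] at hi
    rw [(h3 i).1, (h3 i).2]
    by_cases hpar : i % 2 = 0
    · simp only [if_pos hpar]
      have hie : i = 2 * (i / 2) := by omega
      have hm : i / 2 < M2.length := by omega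
      calc ((List.range' 1 (min (i/2) (M2.length - i/2 - 1))).foldl
              (fun acc j => acc + ((M2.getD (i/2 - j) []).getD (i/2 + j) 0)) 0) * 2
            + ((M2.getD (i/2) []).getD (i/2) 0)
          = 2 * pvP M2 M2.length (2*(i/2)) + pvDg M2 M2.length (2*(i/2)) :=
            pv_A_even M2 (i/2) hm
        _ = 2 * pvP M2 M2.length i + pvDg M2 M2.length i := by rw [← hie]
    · simp only [if_neg hpar]
      have hie : i = 2 * (i / 2) + 1 := by omega
      have hm : i / 2 + 1 < M2.length := by omega
      calc ((List.range (min (i/2) (M2.length - i/2 - 2) + 1)).foldl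
              (fun acc j => acc + ((M2.getD (i/2 - j) []).getD (i/2 + j + 1) 0)) 0) * 2
          = 2 * pvP M2 M2.length (2*(i/2)+1) + pvDg M2 M2.length (2*(i/2)+1) :=
            pv_A_odd M2 (i/2) hm
        _ = 2 * pvP M2 M2.length i + pvDg M2 M2.length i := by rw [← hie]
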